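-- pv_equiv track=rewrite | github.com/XDSEC/MoeCTF_2023 | WriteUps/chitaotao/re/tea.py | str2vec
-- ===== SOURCE A (Python) =====
-- import math
--
-- def str2vec(value, l=4):
--     """
--     Encodes a binary string as a vector.  The string is split into chunks of length l and each chunk is encoded as 2
--     elements in the return value.
--
--     Compliment of _str2vec.
--     :param value:
--         A binary string to encode.
--     :param l:
--         An optional length value of chunks.
--     :return:
--         A vector containing ceil(n / l) elements where n is the length of the value parameter.
--     """
--     if isinstance(value, str):
--         value = value.encode()
--     n = len(value)
--
--     # Split the string into chunks
--     num_chunks = math.ceil(n / l)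
--     chunks = [value[l * i:l * (i + 1)]
--               for i in range(num_chunks)]
--
--     return [sum([character << 8 * j
--                  for j, character in enumerate(chunk)])
--             for chunk in chunks]
-- ===== SOURCE B (Python) =====
-- def str2vec(value, l=4):
--     # Single pass over the bytes with a running accumulator: no intermediate
--     # chunks list, no slicing, no nested comprehension.  Each byte is folded
--     # into cur at the current shift; when the shift reaches 8*l a chunk is
--     # complete and cur is emitted; a trailing partial chunk is emitted at the end.
--     if isinstance(value, str):
--         value = value.encode()
--     out = []
--     cur = 0
--     shift = 0
--     for b in value:
--         cur += b << shift
--         shift += 8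
--         if shift == 8 * l:
--             out.append(cur)
--             cur = 0
--             shift = 0
--     if shift:
--         out.append(cur)
--     return out
-- ===== Notes on version B (the rewrite author's own statement) =====
-- stated objective: alternative
-- what changed: Replaced A's two staged passes (build the list of l-byte chunk slices, then encode each chunk with a nested enumerate-and-shift comprehension) by one single pass over the bytes with a running accumulator and shift counter that emits a finished value whenever the shift reaches 8*l, flushing the trailing partial chunk at the end; no chunks list, no slicing, no nested comprehension.
-- outside the precondition, e.g. on str2vec('a', -2): A returns [], B returns [97]
import Mathlib
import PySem

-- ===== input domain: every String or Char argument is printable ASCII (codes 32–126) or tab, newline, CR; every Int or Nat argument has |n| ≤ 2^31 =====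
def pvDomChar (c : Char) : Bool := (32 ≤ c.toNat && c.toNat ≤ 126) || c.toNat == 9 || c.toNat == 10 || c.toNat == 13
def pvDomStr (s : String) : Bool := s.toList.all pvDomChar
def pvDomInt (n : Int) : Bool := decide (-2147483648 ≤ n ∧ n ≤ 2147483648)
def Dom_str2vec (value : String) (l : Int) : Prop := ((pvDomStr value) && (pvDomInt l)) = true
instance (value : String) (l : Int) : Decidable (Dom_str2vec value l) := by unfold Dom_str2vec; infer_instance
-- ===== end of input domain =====

-- B replaces A's two staged passes (build the list of l-byte chunk slices, then encode each
-- chunk with a nested enumerate/shift comprehension) by ONE pass over the bytes with a running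
-- accumulator and shift counter, emitting a value whenever the shift reaches 8*l and flushing
-- the trailing partial chunk at the end; objective: alternative (same cost).
-- On Dom (ASCII only), value.encode() yields exactly the code points: byte i = code of char i.

-- ===== PORT A =====
-- math.ceil(n / l): the exact integer ceiling (exact for the sizes tested; float rounding of n/l not modelled)
def pyCeilDiv (n l : Int) : Int := -(PySem.Int.floordiv (-n) l)

-- sum([character << 8 * j for j, character in enumerate(chunk)])  (j ≥ 0, so << is * 2^)
def chunkEnc (chunk : List Int) : Int :=
  ((PySem.List.enumerate chunk 0).map (fun jc => jc.2 * 2 ^ (8 * jc.1).toNat)).sum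

def str2vec (value : String) (l : Int) : List Int :=
  let bytes : List Int := value.toList.map (fun c => (c.toNat : Int))
  let n : Int := (bytes.length : Int)
  let numChunks := pyCeilDiv n l
  let chunks := (PySem.List.pyRange 0 numChunks 1).map
      (fun i => PySem.List.slice bytes (some (l * i)) (some (l * (i + 1))))
  chunks.map chunkEnc

-- ===== PORT B =====
-- loop body of Source B on state (out, cur, shift): cur += b << shift; shift += 8; flush when shift == 8*l
def altStep (l : Int) (st : List Int × Int × Nat) (b : Int) : List Int × Int × Nat :=
  let cur := st.2.1 + (b <<< st.2.2)
  let shift := st.2.2 + 8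
  if (shift : Int) = 8 * l then (st.1 ++ [cur], 0, 0) else (st.1, cur, shift)

def str2vec_alt (value : String) (l : Int) : List Int :=
  let bytes : List Int := value.toList.map (fun c => (c.toNat : Int))
  let st := bytes.foldl (altStep l) (([], 0, 0) : List Int × Int × Nat)
  if st.2.2 ≠ 0 then st.1 ++ [st.2.1] else st.1   -- if shift: out.append(cur)

-- ===== PRECONDITION & SPEC =====
-- Pre_ excludes l ≤ 0: for l = 0 A raises ZeroDivisionError (math.ceil(n / 0)); for l < 0 a
-- negative chunk length is a corner no caller would specify — A's [] there falls out of the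
-- negative ceiling and B's single accumulated value is an equally accidental reading.
def Pre_str2vec (value : String) (l : Int) : Prop := 0 < l
instance (value : String) (l : Int) : Decidable (Pre_str2vec value l) := by unfold Pre_str2vec; infer_instance
def pvWitness_str2vec : String × Int := ("abcde", 4)

def Spec_str2vec (value : String) (l : Int) (out : List Int) : Prop := out = str2vec_alt value l
instance (value : String) (l : Int) (out : List Int) : Decidable (Spec_str2vec value l out) := by unfold Spec_str2vec; infer_instance

-- ===== CLAIM (what is proved, stated in full; the proofs are below) =====
def Claim_equal_str2vec : Prop := ∀ (value : String) (l : Int), Dom_str2vec value l → Pre_str2vec value l → Spec_str2vec value l (str2vec value l)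

-- ===== LEMMAS AND PROOFS =====

-- the common recursive chunk decomposition both sides are reduced to (chunk size k+1)
def chunksRec (k : Nat) : List Int → List Int
  | [] => []
  | b :: rest => chunkEnc (b :: rest.take k) :: chunksRec k (rest.drop k)
termination_by bs => bs.length
decreasing_by simp

@[simp] lemma chunksRec_nil (k : Nat) : chunksRec k [] = [] := by rw [chunksRec.eq_def]

lemma chunksRec_cons (k : Nat) (b : Int) (rest : List Int) :
    chunksRec k (b :: rest) = chunkEnc (b :: rest.take k) :: chunksRec k (rest.drop k) := by
  rw [chunksRec.eq_def]

def finishB (st : List Int × Int × Nat) : List Int := if st.2.2 ≠ 0 then st.1 ++ [st.2.1] else st.1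

-- the value B's accumulator adds for a chunk entered at shift sh
def enc : List Int → Nat → Int
  | [], _ => 0
  | b :: r, sh => b * 2 ^ sh + enc r (sh + 8)

lemma enc_general (c : List Int) : ∀ s : Nat,
    enc c (8 * s) = ((PySem.List.enumerate c (s : Int)).map (fun jc => jc.2 * 2 ^ (8 * jc.1).toNat)).sum := by
  induction c with
  | nil => intro s; simp [enc, PySem.List.enumerate]
  | cons b r ih =>
      intro s
      rw [PySem.List.enumerate_cons]
      have h8 : 8 * s + 8 = 8 * (s + 1) := by ring
      have hc : ((8 * (s : Int))).toNat = 8 * s := by omega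
      simp only [enc, List.map_cons, List.sum_cons, h8]
      rw [ih (s + 1), hc]
      norm_cast

lemma enc_eq_chunkEnc (c : List Int) : enc c 0 = chunkEnc c := by
  have h := enc_general c 0
  simpa [chunkEnc] using h

-- ==== A side: str2vec = chunksRec ====

lemma ediv_eq_of (a b q r : Int) (hb : 0 < b) (h : a = b * q + r) (h0 : 0 ≤ r) (h1 : r < b) :
    a / b = q :=
  ((Int.ediv_emod_unique hb).mpr ⟨by linarith, h0, h1⟩).1

-- A's ceiling -((-n) // l) equals (n + l - 1) / l, for l > 0
lemma ceil_count (n l : Int) (hl : 0 < l) : pyCeilDiv n l = (n + l - 1) / l := by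
  have hq := Int.mul_ediv_add_emod n l
  have h0 : 0 ≤ n % l := Int.emod_nonneg n (by omega)
  have h1 : n % l < l := Int.emod_lt_of_pos n hl
  unfold pyCeilDiv
  rw [PySem.Int.floordiv_eq_ediv_of_pos hl]
  by_cases hr : n % l = 0
  · rw [ediv_eq_of (-n) l (-(n / l)) 0 hl (by linarith) le_rfl hl,
        ediv_eq_of (n + l - 1) l (n / l) (l - 1) hl (by linarith) (by omega) (by omega)]
    ring
  · rw [ediv_eq_of (-n) l (-(n / l) - 1) (l - n % l) hl (by linarith) (by omega) (by omega),
        ediv_eq_of (n + l - 1) l (n / l + 1) (n % l - 1) hl (by linarith) (by omega) (by omega)]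
    ring

-- the chunk count as a Nat
def cN (n L : Nat) : Nat := (n + L - 1) / L

lemma count_toNat (n L : Nat) (hL : 0 < L) : (pyCeilDiv (n : Int) (L : Int)).toNat = cN n L := by
  rw [ceil_count _ _ (by exact_mod_cast hL)]
  have h : (n : Int) + (L : Int) - 1 = ((n + L - 1 : Nat) : Int) := by omega
  have hdiv := Int.natCast_ediv (n + L - 1) L
  rw [h, ← hdiv]
  simp only [cN, Int.toNat_natCast]

lemma cN_zero (L : Nat) (hL : 0 < L) : cN 0 L = 0 := by
  unfold cN
  exact Nat.div_eq_of_lt (by omega)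

lemma cN_succ (n L : Nat) (hL : 0 < L) (hn : 0 < n) : cN n L = cN (n - L) L + 1 := by
  unfold cN
  by_cases h : n ≤ L
  · have h1 : n - L = 0 := by omega
    have h2 : n + L - 1 = (n - 1) + L := by omega
    rw [h1, h2, Nat.add_div_right _ hL, Nat.div_eq_of_lt (by omega), Nat.div_eq_of_lt (by omega)]
  · have h2 : n + L - 1 = ((n - L) + L - 1) + L := by omega
    rw [h2, Nat.add_div_right _ hL]

lemma slices_chunksRec (L : Nat) (hL : 0 < L) : ∀ (N : Nat) (bs : List Int), bs.length ≤ N →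
    (List.range (cN bs.length L)).map (fun i => chunkEnc ((bs.drop (L * i)).take L))
      = chunksRec (L - 1) bs := by
  intro N
  induction N with
  | zero =>
      intro bs hlen
      have : bs = [] := List.length_eq_zero_iff.mp (by omega)
      subst this
      simp [cN_zero L hL]
  | succ N ih =>
      intro bs hlen
      cases bs with
      | nil => simp [cN_zero L hL]
      | cons b rest =>
          have hn : 0 < (b :: rest).length := by simp
          rw [cN_succ _ L hL hn, List.range_succ_eq_map, List.map_cons, List.map_map]
          have htake : ((b :: rest).drop (L * 0)).take L = b :: rest.take (L - 1) := by
            obtain ⟨m, hm⟩ : ∃ m, L = m + 1 := ⟨L - 1, by omega⟩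
            subst hm
            simp [List.take_succ_cons]
          have hdroplen : (b :: rest).length - L = (rest.drop (L - 1)).length := by
            simp; omega
          have hdrop : ∀ i : Nat, (b :: rest).drop (L * (i + 1)) = (rest.drop (L - 1)).drop (L * i) := by
            intro i
            rw [List.drop_drop]
            have h1 : L * (i + 1) = L * i + (L - 1) + 1 := by
              have : L = (L - 1) + 1 := by omega
              nlinarith [this]
            rw [h1, List.drop_succ_cons, Nat.add_comm]
          have hmap : ∀ i ∈ List.range (cN ((rest.drop (L-1)).length) L),
              ((fun i => chunkEnc (((b :: rest).drop (L * i)).take L)) ∘ Nat.succ) i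
                = (fun i => chunkEnc (((rest.drop (L - 1)).drop (L * i)).take L)) i := by
            intro i _
            simp only [Function.comp_apply, Nat.succ_eq_add_one]
            rw [hdrop i]
          rw [htake, hdroplen, List.map_congr_left hmap, ih _ (by simp at hlen ⊢; omega),
              ← chunksRec_cons]

lemma strA_eq_chunksRec (value : String) (l : Int) (hl : 0 < l) :
    str2vec value l = chunksRec (l.toNat - 1) (value.toList.map (fun c => (c.toNat : Int))) := by
  simp only [str2vec]
  set bytes : List Int := value.toList.map (fun c => (c.toNat : Int)) with hb
  set L : Nat := l.toNat with hLdef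
  have hL : 0 < L := by omega
  have hlL : l = (L : Int) := by omega
  rw [PySem.List.pyRange_one, List.map_map, List.map_map]
  have hcount : ((pyCeilDiv (bytes.length : Int) l - 0)).toNat = cN bytes.length L := by
    rw [hlL, Int.sub_zero]
    exact count_toNat bytes.length L hL
  rw [hcount, ← slices_chunksRec L hL bytes.length bytes le_rfl]
  apply List.map_congr_left
  intro k _
  simp only [Function.comp_apply]
  have h1 : l * ((0 : Int) + (k : Nat)) = ((L * k : Nat) : Int) := by rw [hlL]; push_cast; ring
  have h2 : l * ((0 : Int) + (k : Nat) + 1) = ((L * k : Nat) : Int) + ((L : Nat) : Int) := by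
    rw [hlL]; push_cast; ring
  rw [h1, h2, PySem.List.slice_natCast_add]

-- ==== B side: str2vec_alt = chunksRec ====

lemma fold_chunk (l : Int) (L : Nat) (hlL : (L : Int) = l) :
    ∀ (c : List Int) (out : List Int) (cur : Int) (sh : Nat), sh < 8 * L →
      sh + 8 * c.length ≤ 8 * L →
      c.foldl (altStep l) (out, cur, sh) =
        (if sh + 8 * c.length = 8 * L then (out ++ [cur + enc c sh], 0, 0)
         else (out, cur + enc c sh, sh + 8 * c.length)) := by
  intro c
  induction c with
  | nil =>
      intro out cur sh hlt hle
      rw [if_neg (by simpa using by omega : ¬ sh + 8 * List.length ([] : List Int) = 8 * L)]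
      simp [enc]
  | cons b r ih =>
      intro out cur sh hlt hle
      simp only [List.foldl_cons]
      have hshift : b <<< sh = b * 2 ^ sh := Int.shiftLeft_eq b sh
      by_cases hflush : ((sh + 8 : Nat) : Int) = 8 * l
      · have hfl : sh + 8 = 8 * L := by omega
        have hr : r = [] := by
          have : r.length = 0 := by simp at hle; omega
          exact List.length_eq_zero_iff.mp this
        subst hr
        simp only [altStep, if_pos hflush, List.foldl_nil]
        rw [if_pos (by simp [hfl])]
        simp [enc, hshift]
      · have hne : sh + 8 ≠ 8 * L := by
          intro h; exact hflush (by omega)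
        simp only [altStep, if_neg hflush]
        rw [ih (out) (cur + b <<< sh) (sh + 8) (by simp at hle; omega) (by simp at hle ⊢; omega)]
        have hlen : sh + 8 + 8 * r.length = sh + 8 * (b :: r).length := by simp; ring
        rw [hlen]
        simp [enc, hshift, add_assoc]

lemma fold_main (l : Int) (L : Nat) (hL : 0 < L) (hlL : (L : Int) = l) :
    ∀ (N : Nat) (bs : List Int), bs.length ≤ N → ∀ out : List Int,
      finishB (bs.foldl (altStep l) (out, 0, 0)) = out ++ chunksRec (L - 1) bs := by
  intro N
  induction N with
  | zero =>
      intro bs hlen out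
      have : bs = [] := List.length_eq_zero_iff.mp (by omega)
      subst this
      simp [finishB]
  | succ N ih =>
      intro bs hlen out
      cases bs with
      | nil => simp [finishB]
      | cons b rest =>
          have hsplit : b :: rest = (b :: rest).take L ++ (b :: rest).drop L :=
            (List.take_append_drop L (b :: rest)).symm
          conv_lhs => rw [hsplit]
          rw [List.foldl_append]
          have htlen : ((b :: rest).take L).length = min L (b :: rest).length := by simp
          by_cases hbig : L ≤ (b :: rest).length
          · -- full chunk: flush, then recurse on the rest
            have hclen : ((b :: rest).take L).length = L := by omega
            rw [fold_chunk l L hlL _ out 0 0 (by omega) (by omega), if_pos (by omega)]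
            rw [ih ((b :: rest).drop L) (by simp at hlen ⊢; omega) (out ++ [0 + enc ((b :: rest).take L) 0])]
            have htake : (b :: rest).take L = b :: rest.take (L - 1) := by
              obtain ⟨m, hm⟩ : ∃ m, L = m + 1 := ⟨L - 1, by omega⟩
              subst hm
              simp [List.take_succ_cons]
            have hdrop : (b :: rest).drop L = rest.drop (L - 1) := by
              obtain ⟨m, hm⟩ : ∃ m, L = m + 1 := ⟨L - 1, by omega⟩
              subst hm
              simp
            rw [chunksRec_cons, ← htake, ← hdrop, zero_add, enc_eq_chunkEnc, List.append_assoc]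
            rfl
          · -- trailing partial chunk
            have hclen : ((b :: rest).take L).length = (b :: rest).length := by omega
            have hpos : 0 < (b :: rest).length := by simp
            rw [fold_chunk l L hlL _ out 0 0 (by omega) (by omega), if_neg (by omega)]
            have hdropnil : (b :: rest).drop L = [] := by
              apply List.drop_eq_nil_of_le; omega
            rw [hdropnil, List.foldl_nil]
            have htakeall : (b :: rest).take L = b :: rest := List.take_of_length_le (by omega)
            have htke : rest.take (L - 1) = rest := List.take_of_length_le (by simp at hbig ⊢; omega)
            have hdrpe : rest.drop (L - 1) = [] := List.drop_eq_nil_of_le (by simp at hbig ⊢; omega)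
            rw [chunksRec_cons, htke, hdrpe, chunksRec_nil, htakeall]
            unfold finishB
            simp [enc_eq_chunkEnc]

lemma strB_eq_chunksRec (value : String) (l : Int) (hl : 0 < l) :
    str2vec_alt value l = chunksRec (l.toNat - 1) (value.toList.map (fun c => (c.toNat : Int))) := by
  simp only [str2vec_alt]
  set bytes : List Int := value.toList.map (fun c => (c.toNat : Int)) with hb
  have h := fold_main l l.toNat (by omega) (by omega) bytes.length bytes le_rfl []
  unfold finishB at h
  simpa using h

-- ===== VERDICT (by name: the statement is the Claim_ definition above) =====
theorem str2vec_spec : Claim_equal_str2vec := by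
  intro value l _hdom hpre
  unfold Spec_str2vec
  rw [strA_eq_chunksRec value l hpre, strB_eq_chunksRec value l hpre]
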